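-- pv_equiv track=rewrite | github.com/mateuszbaca/FieldVoles | output_consensus_3fasta_v8.py | calculate_consensus
-- ===== SOURCE A (Python) =====
-- from collections import Counter
--
-- def calculate_consensus(sequences):
--     nucleotide_counts = Counter(sequences)
--
--     for nucleotide, count in nucleotide_counts.items():
--         if count >= 2:
--             consensus = nucleotide
--             consensus_support = count
--             return consensus, consensus_support
--
--     return '', 0
-- ===== SOURCE B (Python) =====
-- def calculate_consensus(sequences):
--     # Recursive shrink-and-count: take the head, count it within the remaining
--     # suffix only, and recurse on the suffix with all copies of the head removed.
--     def go(rest):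
--         if not rest:
--             return '', 0
--         n, tail = rest[0], rest[1:]
--         c = 1 + sum(1 for x in tail if x == n)
--         if c >= 2:
--             return n, c
--         return go([x for x in tail if x != n])
--     return go(list(sequences))
-- ===== Notes on version B (the rewrite author's own statement) =====
-- stated objective: alternative
-- what changed: Replaces the Counter build plus items scan by a shrinking recursion: count the head within the remaining suffix only, return (head, 1+suffix count) if >= 2, otherwise recurse on the suffix with all copies of the head removed; it returns without ever touching the rest of the input once a duplicate head is found.
import Mathlib
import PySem

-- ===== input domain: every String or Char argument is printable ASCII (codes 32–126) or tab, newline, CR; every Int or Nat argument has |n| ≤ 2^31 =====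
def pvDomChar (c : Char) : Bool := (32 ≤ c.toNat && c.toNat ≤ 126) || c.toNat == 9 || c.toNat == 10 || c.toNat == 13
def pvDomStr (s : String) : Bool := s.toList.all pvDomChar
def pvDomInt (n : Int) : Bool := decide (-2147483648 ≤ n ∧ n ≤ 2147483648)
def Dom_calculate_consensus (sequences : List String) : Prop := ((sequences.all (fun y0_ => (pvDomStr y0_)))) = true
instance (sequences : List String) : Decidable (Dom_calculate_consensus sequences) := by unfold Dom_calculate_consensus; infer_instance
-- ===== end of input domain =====

-- B replaces the Counter build + items scan by a shrinking recursion: count the head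
-- in the suffix only, and recurse on the suffix with copies of the head removed (alternative; not faster).

-- ===== PORT A =====
-- the 'for nucleotide, count in nucleotide_counts.items(): if count >= 2: return …' loop
def pvScanItemsA : List (String × Int) → String × Int
  | [] => ("", 0)
  | (nucleotide, count) :: rest =>
      if 2 ≤ count then (nucleotide, count) else pvScanItemsA rest

def calculate_consensus (sequences : List String) : String × Int :=
  let nucleotide_counts := PySem.Dict.counter sequences
  pvScanItemsA nucleotide_counts.items

-- ===== PORT B =====
-- the recursive helper 'go' of Source B: head, count in suffix, filter and recurse
def pvGoB : List String → String × Int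
  | [] => ("", 0)
  | n :: tail =>
      let c : Int := 1 + (tail.filter (fun x => x == n)).length
      if 2 ≤ c then (n, c)
      else pvGoB (tail.filter (fun x => x != n))
  termination_by l => l.length
  decreasing_by
    simpa using Nat.lt_succ_of_le (List.length_filter_le _ tail)

def calculate_consensus_alt (sequences : List String) : String × Int :=
  pvGoB sequences

-- ===== PRECONDITION & SPEC =====
def Spec_calculate_consensus (sequences : List String) (out : String × Int) : Prop := out = calculate_consensus_alt sequences
instance (sequences : List String) (out : String × Int) : Decidable (Spec_calculate_consensus sequences out) := by unfold Spec_calculate_consensus; infer_instance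

-- ===== CLAIM (what is proved, stated in full; the proofs are below) =====
def Claim_equal_calculate_consensus : Prop := ∀ (sequences : List String), Dom_calculate_consensus sequences → Spec_calculate_consensus sequences (calculate_consensus sequences)

-- ===== LEMMAS AND PROOFS =====

theorem pvScanItemsA_eq_find? (l : List (String × Int)) :
    pvScanItemsA l = ((l.find? (fun p => decide (2 ≤ p.2))).getD ("", 0)) := by
  induction l with
  | nil => rfl
  | cons p rest ih =>
      obtain ⟨n, c⟩ := p
      simp only [pvScanItemsA, List.find?_cons]
      by_cases h : 2 ≤ c <;> simp [h, ih]

theorem find?_congr_mem {α : Type} (l : List α) (p q : α → Bool)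
    (h : ∀ a ∈ l, p a = q a) : l.find? p = l.find? q := by
  induction l with
  | nil => rfl
  | cons x xs ih =>
      simp only [List.find?_cons, h x (by simp)]
      split
      · rfl
      · exact ih (fun a ha => h a (by simp [ha]))

theorem count_eq_filter_beq (n : String) (l : List String) :
    List.count n l = (l.filter (fun x => x == n)).length := by
  simp [List.count, List.countP_eq_length_filter]

-- B's recursion computes 'first element (in order) whose total count is >= 2, with that count'
theorem pvGoB_eq_find? (xs : List String) :
    pvGoB xs = (((xs.find? (fun n => decide (2 ≤ List.count n xs))).map
      (fun n => (n, (List.count n xs : Int)))).getD ("", 0)) := by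
  induction hL : xs.length using Nat.strong_induction_on generalizing xs with
  | _ L ih =>
    cases xs with
    | nil => simp [pvGoB]
    | cons n tail =>
      have hcnt : List.count n (n :: tail) = 1 + (tail.filter (fun x => x == n)).length := by
        rw [List.count_cons_self, count_eq_filter_beq]; omega
      by_cases h : 2 ≤ List.count n (n :: tail)
      · have hc : (2 : Int) ≤ 1 + ((tail.filter (fun x => x == n)).length : Int) := by
          rw [hcnt] at h; omega
        rw [List.find?_cons_of_pos (by simpa using h)]
        simp only [pvGoB, if_pos hc, Option.map_some, Option.getD_some]
        refine Prod.ext rfl ?_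
        simp only [hcnt]; push_cast; ring
      · have hflen : (tail.filter (fun x => x == n)).length = 0 := by omega
        have hnone : ∀ x ∈ tail, ¬ (x = n) := by
          intro x hx hxn
          subst hxn
          have hmem : x ∈ tail.filter (fun y => y == x) := by
            simp [List.mem_filter, hx]
          rw [List.length_eq_zero_iff.mp hflen] at hmem
          simp at hmem
        have hfilter : tail.filter (fun x => x != n) = tail := by
          apply List.filter_eq_self.mpr
          intro x hx; simp [hnone x hx]
        have hc : ¬ ((2 : Int) ≤ 1 + ((tail.filter (fun x => x == n)).length : Int)) := by
          rw [hflen]; norm_num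
        have hcount_tail : ∀ m ∈ tail, List.count m (n :: tail) = List.count m tail := by
          intro m hm
          simp only [List.count_cons]
          have hne : ¬ (n = m) := fun hnm => hnone m hm hnm.symm
          simp [hne]
        rw [List.find?_cons_of_neg (by simpa using h)]
        simp only [pvGoB, if_neg hc, hfilter]
        rw [ih tail.length (by simp [← hL]) tail rfl]
        rw [find?_congr_mem tail (fun m => decide (2 ≤ List.count m (n :: tail)))
              (fun m => decide (2 ≤ List.count m tail))
              (fun m hm => by simp only [hcount_tail m hm])]
        cases hfind : tail.find? (fun m => decide (2 ≤ List.count m tail)) with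
        | none => rfl
        | some m =>
            have hm : m ∈ tail := List.mem_of_find?_eq_some hfind
            simp only [Option.map_some, Option.getD_some]
            exact Prod.ext rfl (by rw [hcount_tail m hm])

theorem foldl_add_prefix (xs : List String) (s : List String) :
    s <+: xs.foldl PySem.Set.add s := by
  induction xs generalizing s with
  | nil => exact List.prefix_rfl
  | cons x xs ih =>
      refine List.IsPrefix.trans ?_ (ih (PySem.Set.add s x))
      simp only [PySem.Set.add]
      split <;> simp

theorem find?_foldl_add (q : String → Bool) (xs : List String) (s : List String)
    (hs : ∀ a ∈ s, q a = false) :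
    (xs.foldl PySem.Set.add s).find? q = xs.find? q := by
  have hnone : s.find? q = none := List.find?_eq_none.mpr (fun a ha => by simp [hs a ha])
  induction xs generalizing s with
  | nil => simpa using hnone
  | cons x xs ih =>
      simp only [List.foldl_cons, List.find?_cons]
      by_cases hx : q x = true
      · have hxs : x ∉ s := fun hmem => by simp [hs x hmem] at hx
        have hadd : PySem.Set.add s x = s ++ [x] := by
          simp [PySem.Set.add, PySem.Set.contains]
          intro h; exact absurd h hxs
        obtain ⟨t, ht⟩ := foldl_add_prefix xs (PySem.Set.add s x)
        rw [← ht, hadd, List.append_assoc, List.find?_append, List.find?_append]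
        simp [hnone, hx]
      · have hx' : q x = false := by simpa using hx
        have hs' : ∀ a ∈ PySem.Set.add s x, q a = false := by
          intro a ha
          rcases (PySem.Set.mem_add s x a).mp ha with h | h
          · exact hs a h
          · rw [h]; exact hx'
        rw [ih (PySem.Set.add s x) hs'
          (List.find?_eq_none.mpr (fun a ha => by simp [hs' a ha]))]
        simp [hx']

theorem find?_ofList (q : String → Bool) (xs : List String) :
    (PySem.Set.ofList xs).find? q = xs.find? q := by
  simpa [PySem.Set.ofList_eq_foldl] using find?_foldl_add q xs [] (by simp)

-- ===== VERDICT (by name: the statement is the Claim_ definition above) =====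
theorem calculate_consensus_spec : Claim_equal_calculate_consensus := by
  intro sequences _
  unfold Spec_calculate_consensus calculate_consensus calculate_consensus_alt
  rw [pvGoB_eq_find?, pvScanItemsA_eq_find?, PySem.Dict.items_counter, List.find?_map]
  rw [find?_ofList]
  simp [Function.comp_def]
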